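-- pv_equiv track=rewrite | github.com/pc5401/my_BOJ | 백준/Silver/4839. 소진법/소진법.py | solve
-- ===== SOURCE A (Python) =====
-- def next_prime(primes):
--     if not primes:
--         return 2
--     x = primes[-1] + 1
--     while True:
--         is_p = True
--         for p in primes:
--             if p * p > x:
--                 break
--             if x % p == 0:
--                 is_p = False
--                 break
--         if is_p:
--             return x
--         x += 1
--
-- def solve(n):
--     orig = n
--     digits = []
--     primes = []
--     while n > 0:
--         if not primes:
--             p = 2
--             primes.append(p)
--         else:
--             p = next_prime(primes)
--             primes.append(p)
--         digits.append(n % p)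
--         n //= p
--     terms = []
--     if digits:
--         prefix = []
--         for i, a in enumerate(digits):
--             if a == 0:
--                 continue
--             if i == 0:
--                 terms.append(str(a))
--             else:
--                 if i > len(prefix):
--                     prefix = [str(primes[j]) for j in range(i)]
--                 terms.append(str(a) + "*" + "*".join(prefix))
--     else:
--         terms.append("0")
--     return f"{orig} = " + " + ".join(terms)
-- ===== SOURCE B (Python) =====
-- # Table of successive primes: their running product exceeds 2**31 after ten
-- # entries, so twelve are ample for any 32-bit input.
-- _PRIMES = [2, 3, 5, 7, 11, 13, 17, 19, 23, 29, 31, 37]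
--
-- def solve(n):
--     if n <= 0:
--         return f"{n} = 0"
--     # primorial prefix products 1, 2, 6, 30, ... not exceeding n
--     prods = []
--     prod = 1
--     for p in _PRIMES:
--         if prod > n:
--             break
--         prods.append(prod)
--         prod *= p
--     # digit i is read off non-destructively: (n // primorial_i) % prime_i
--     terms = []
--     for i, q in enumerate(prods):
--         d = (n // q) % _PRIMES[i]
--         if d:
--             terms.append("*".join(str(v) for v in [d] + _PRIMES[:i]))
--     return f"{n} = " + " + ".join(terms)
-- ===== Notes on version B (the rewrite author's own statement) =====
-- stated objective: alternative
-- what changed: B replaces A's incremental trial-division prime generation and destructive n %= p / n //= p digit loop with a fixed prime table, a primorial prefix-product list, and non-destructive closed-form digits (n // primorial_i) % prime_i, formatting each term with one unified '*'.join over [digit] + primes[:i] instead of A's cached prefix list.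
import Mathlib
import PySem

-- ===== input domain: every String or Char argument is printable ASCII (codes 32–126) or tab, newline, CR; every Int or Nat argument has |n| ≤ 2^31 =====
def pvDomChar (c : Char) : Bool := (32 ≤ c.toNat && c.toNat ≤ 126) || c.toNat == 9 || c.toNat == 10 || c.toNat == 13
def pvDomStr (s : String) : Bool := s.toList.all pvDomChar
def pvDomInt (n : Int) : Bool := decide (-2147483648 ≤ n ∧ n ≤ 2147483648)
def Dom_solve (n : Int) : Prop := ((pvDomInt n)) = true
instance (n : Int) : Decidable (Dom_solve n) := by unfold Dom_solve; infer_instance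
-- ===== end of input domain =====

-- B replaces A's destructive repeated n %= p / n //= p with a fixed prime table,
-- a primo prefix-product list and non-destructive closed-form digits
-- (n // primo_i) % prime_i; return value only, no argument is mutated.

-- ===== PORT A =====
-- inner 'for p in primes' loop of next_prime (break conditions in Python's order)
def isP (primes : List Int) (x : Int) : Bool :=
  match primes with
  | [] => true
  | p :: ps =>
    if p * p > x then true
    else if PySem.Int.mod x p == 0 then false
    else isP ps x

lemma isP_shift (primes : List Int) (x : Int) (hx : ¬ isP primes x = true)
    (h : ∃ k : ℕ, isP primes (x + (k : Int)) = true) :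
    ∃ k : ℕ, isP primes ((x + 1) + (k : Int)) = true := by
  obtain ⟨k, hk⟩ := h
  match k, hk with
  | 0, hk => exact absurd (by simpa using hk) hx
  | (k+1), hk => exact ⟨k, by convert hk using 2; omega⟩

lemma find_shift_lt (primes : List Int) (x : Int) (hx : ¬ isP primes x = true)
    (h : ∃ k : ℕ, isP primes (x + (k : Int)) = true)
    (h' : ∃ k : ℕ, isP primes ((x + 1) + (k : Int)) = true) :
    Nat.find h' < Nat.find h := by
  have hspec := Nat.find_spec h
  have hfpos : 1 ≤ Nat.find h := by
    rcases Nat.eq_zero_or_pos (Nat.find h) with h0 | h0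
    · rw [h0] at hspec; simp at hspec; exact absurd hspec hx
    · exact h0
  have hshift : isP primes ((x + 1) + ((Nat.find h - 1 : ℕ) : Int)) = true := by
    have e : ((x : Int) + 1) + ((Nat.find h - 1 : ℕ) : Int) = x + (Nat.find h : Int) := by
      rw [Nat.cast_sub hfpos]
      ring
    rw [e]
    exact hspec
  exact Nat.lt_of_le_of_lt (Nat.find_le hshift) (Nat.sub_lt hfpos Nat.one_pos)

-- the 'while True: ... x += 1' search; the Prop argument (erased at runtime) only
-- records that some candidate succeeds, which Python's loop needs to terminate
def nextAux (primes : List Int) (x : Int)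
    (h : ∃ k : ℕ, isP primes (x + (k : Int)) = true) : Int :=
  if hx : isP primes x = true then x
  else nextAux primes (x + 1) (isP_shift primes x hx h)
termination_by Nat.find h
decreasing_by exact find_shift_lt primes x hx h (isP_shift primes x hx h)

def next_prime (primes : List Int)
    (h : ∃ k : ℕ, isP primes ((PySem.List.pyGetD primes (-1) 0 + 1) + (k : Int)) = true) : Int :=
  if primes.isEmpty then 2
  else nextAux primes (PySem.List.pyGetD primes (-1) 0 + 1) h

-- A prime beyond every list element passes the trial division, so the search terminates
lemma isP_true_of_prime (q : ℕ) (hq : Nat.Prime q) :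
    ∀ (primes : List Int), (∀ p ∈ primes, 2 ≤ p ∧ p < (q : Int)) → isP primes (q : Int) = true := by
  intro primes
  induction primes with
  | nil => intro _; simp [isP]
  | cons p ps ih =>
    intro hall
    obtain ⟨h2, hlt⟩ := hall p (by simp)
    by_cases hb : p * p > (q : Int)
    · simp [isP, hb]
    · have hnd : ¬ PySem.Int.mod (q : Int) p = 0 := by
        rw [PySem.Int.mod_eq_zero_iff_dvd]
        intro hdvd
        have hp' : ((p.toNat : ℕ) : Int) = p := Int.toNat_of_nonneg (by linarith)
        rw [← hp'] at hdvd
        have hnat : p.toNat ∣ q := by exact_mod_cast hdvd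
        rcases Nat.Prime.eq_one_or_self_of_dvd hq _ hnat with h1 | h1
        · rw [h1, Nat.cast_one] at hp'; linarith
        · rw [h1] at hp'; linarith
      simp only [isP, if_neg hb]
      rw [if_neg (by simpa using hnd)]
      exact ih (fun r hr => hall r (by simp [hr]))

lemma exists_isP (primes : List Int) (h2 : ∀ p ∈ primes, 2 ≤ p) (x : Int) :
    ∃ k : ℕ, isP primes (x + (k : Int)) = true := by
  obtain ⟨q, hqge, hq⟩ :=
    Nat.exists_infinite_primes (x.toNat + (primes.foldl max 2).toNat + 1)
  refine ⟨((q : Int) - x).toNat, ?_⟩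
  have gen2 : ∀ (l : List Int) (a : Int), a ≤ l.foldl max a := by
    intro l
    induction l with
    | nil => simp
    | cons y ys ih => intro a; exact le_trans (le_max_left a y) (ih (max a y))
  have gen : ∀ (l : List Int) (a : Int), ∀ z ∈ l, z ≤ l.foldl max a := by
    intro l
    induction l with
    | nil => simp
    | cons y ys ih =>
      intro a z hz
      rcases hz with _ | hz
      · exact le_trans (le_max_right a y) (gen2 ys (max a y))
      · exact ih (max a y) z (by assumption)
  have hxq : x ≤ (q : Int) := by
    refine le_trans (Int.self_le_toNat x) ?_
    exact_mod_cast Nat.le_of_lt (Nat.lt_of_lt_of_le (Nat.lt_succ_of_le (Nat.le_add_right _ _)) hqge)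
  have hX : x + ((((q : Int) - x).toNat : ℕ) : Int) = (q : Int) := by
    rw [Int.toNat_of_nonneg (by linarith)]
    ring
  rw [hX]
  refine isP_true_of_prime q hq primes (fun p hp => ⟨h2 p hp, ?_⟩)
  have hM : p ≤ primes.foldl max 2 := gen primes 2 p hp
  refine lt_of_le_of_lt (le_trans hM (Int.self_le_toNat _)) ?_
  exact_mod_cast Nat.lt_of_lt_of_le (Nat.lt_succ_of_le (Nat.le_add_left _ _)) hqge

lemma nextAux_ge (primes : List Int) (x : Int) (h) : x ≤ nextAux primes x h := by
  fun_induction nextAux with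
  | case1 => omega
  | case2 => omega

-- 'if not primes: p = 2 else: p = next_prime(primes)' as one helper
def pChoice (primes : List Int) (hp : ∀ p ∈ primes, 2 ≤ p) : Int :=
  if primes.isEmpty then 2
  else next_prime primes (exists_isP primes hp (PySem.List.pyGetD primes (-1) 0 + 1))

lemma two_le_p (primes : List Int) (hp : ∀ p ∈ primes, 2 ≤ p) :
    2 ≤ pChoice primes hp := by
  unfold pChoice
  by_cases he : primes.isEmpty
  · simp [he]
  · have hne : primes ≠ [] := by simpa [List.isEmpty_iff] using he
    have hlast : 2 ≤ PySem.List.pyGetD primes (-1) 0 := by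
      rw [PySem.List.pyGetD_neg_one primes 0 hne]
      exact hp _ (List.getLast_mem hne)
    have := nextAux_ge primes (PySem.List.pyGetD primes (-1) 0 + 1)
      (exists_isP primes hp (PySem.List.pyGetD primes (-1) 0 + 1))
    simp only [next_prime, if_neg he]
    linarith

lemma append_ge2 (primes : List Int) (hp : ∀ p ∈ primes, 2 ≤ p) (p : Int) (h2 : 2 ≤ p) :
    ∀ r ∈ primes ++ [p], 2 ≤ r := by
  intro r hr
  rcases List.mem_append.1 hr with h | h
  · exact hp r h
  · simp only [List.mem_singleton] at h
    rw [h]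
    exact h2

lemma floordiv_toNat_lt (n p : Int) (hn : n > 0) (hp : 2 ≤ p) :
    (PySem.Int.floordiv n p).toNat < n.toNat := by
  rw [PySem.Int.floordiv_eq_ediv_of_pos (by linarith)]
  have h1 : n / p < n := by
    refine Int.ediv_lt_of_lt_mul (by linarith) ?_
    calc n = n * 1 := (mul_one n).symm
    _ < n * p := mul_lt_mul_of_pos_left (by linarith) hn
  exact (Int.toNat_lt_toNat hn).mpr h1

-- the 'while n > 0' loop of solve; returns (digits, primes)
def solveLoop (n : Int) (primes digits : List Int)
    (hp : ∀ p ∈ primes, 2 ≤ p) : List Int × List Int :=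
  if hn : n > 0 then
    let p : Int := pChoice primes hp
    solveLoop (PySem.Int.floordiv n p) (primes ++ [p]) (digits ++ [PySem.Int.mod n p])
      (append_ge2 primes hp p (two_le_p primes hp))
  else (digits, primes)
termination_by n.toNat
decreasing_by exact floordiv_toNat_lt n (pChoice primes hp) hn (two_le_p primes hp)

-- formatting loop over enumerate(digits), with the cached 'prefix' list
def formatLoop (primes : List Int) (items : List (Int × Int))
    (prefixx : List String) (terms : List String) : List String :=
  match items with
  | [] => terms
  | (i, a) :: rest =>
    if a == 0 then formatLoop primes rest prefixx terms
    else if i == 0 then formatLoop primes rest prefixx (terms ++ [PySem.Int.toStr a])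
    else
      let prefixx' := if i > (prefixx.length : Int) then
          (PySem.List.pyRange 0 i 1).map (fun j => PySem.Int.toStr (PySem.List.pyGetD primes j 0))
        else prefixx
      formatLoop primes rest prefixx'
        (terms ++ [PySem.Int.toStr a ++ "*" ++ PySem.Str.join "*" prefixx'])

lemma nil_ge2 : ∀ p ∈ ([] : List Int), 2 ≤ p := by simp

def solve (n : Int) : String :=
  let r := solveLoop n [] [] nil_ge2
  let digits := r.1
  let primes := r.2
  let terms : List String :=
    if digits.isEmpty then ["0"]
    else formatLoop primes (PySem.List.enumerate digits) [] []
  PySem.Int.toStr n ++ " = " ++ PySem.Str.join " + " terms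

-- ===== PORT B =====
-- fixed prime table of Source B (its running product exceeds 2^31 after ten entries)
def PRIMES : List Int := [2, 3, 5, 7, 11, 13, 17, 19, 23, 29, 31, 37]

-- 'for p in _PRIMES: if prod > n: break; prods.append(prod); prod *= p'
def buildProds (n : Int) : List Int → Int → List Int
  | [], _ => []
  | p :: ps, prod => if prod > n then [] else prod :: buildProds n ps (prod * p)

-- body of Source B's term loop: the optional term for position i with primo q
def termOf (n : Int) (i q : Int) : Option String :=
  let d := PySem.Int.mod (PySem.Int.floordiv n q) (PySem.List.pyGetD PRIMES i 0)
  if d ≠ 0 then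
    some (PySem.Str.join "*" ((d :: PySem.List.slice PRIMES none (some i)).map PySem.Int.toStr))
  else none

def solve_alt (n : Int) : String :=
  if n ≤ 0 then PySem.Int.toStr n ++ " = 0"
  else
    let prods := buildProds n PRIMES 1
    let terms := (PySem.List.enumerate prods).filterMap (fun iq => termOf n iq.1 iq.2)
    PySem.Int.toStr n ++ " = " ++ PySem.Str.join " + " terms

-- ===== PRECONDITION & SPEC =====
def Spec_solve (n : Int) (out : String) : Prop := out = solve_alt n
instance (n : Int) (out : String) : Decidable (Spec_solve n out) := by unfold Spec_solve; infer_instance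

-- ===== CLAIM (what is proved, stated in full; the proofs are below) =====
def Claim_equal_solve : Prop := ∀ (n : Int), Dom_solve n → Spec_solve n (solve n)

-- ===== LEMMAS AND PROOFS =====

-- canonical digit list: repeated floordiv along a prime list
def digitsFrom : List Int → Int → List Int
  | [], _ => []
  | p :: ps, n =>
    if n > 0 then PySem.Int.mod n p :: digitsFrom ps (PySem.Int.floordiv n p) else []

def primo (k : ℕ) : Int := (PRIMES.take k).prod

def mkTerm (d : Int) (s : ℕ) : String :=
  PySem.Str.join "*" ((d :: PRIMES.take s).map PySem.Int.toStr)

-- canonical term list both formatting loops produce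
def termsOf : List Int → ℕ → List String
  | [], _ => []
  | d :: ds, s => (if d = 0 then [] else [mkTerm d s]) ++ termsOf ds (s + 1)

lemma primes_ge2 : ∀ p ∈ PRIMES, 2 ≤ p := by decide

lemma prim_pos (k : ℕ) (hk : k ≤ 12) : 0 < primo k := by
  interval_cases k <;> decide

lemma prim_le_k9 (k : ℕ) (h1 : k ≤ 12) (h2 : primo k ≤ 2 ^ 31) : k ≤ 9 := by
  by_contra h3
  have h4 : 10 ≤ k := by omega
  interval_cases k <;> revert h2 <;> decide

-- evaluate the search loop: m failures then success lands at x + m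
lemma nextAux_eval (m : ℕ) : ∀ (primes : List Int) (x : Int) (h),
    (∀ j : ℕ, j < m → isP primes (x + (j : Int)) = false) →
    isP primes (x + (m : Int)) = true →
    nextAux primes x h = x + (m : Int) := by
  induction m with
  | zero =>
    intro primes x h _ hm
    rw [nextAux]
    simp only [show isP primes x = true by simpa using hm, dif_pos]
    omega
  | succ m ih =>
    intro primes x h hlt hm
    have hx : isP primes x = false := by simpa using hlt 0 (by omega)
    rw [nextAux]
    rw [dif_neg (by simp [hx])]
    rw [ih primes (x + 1) _
      (fun j hj => by have := hlt (j + 1) (by omega); convert this using 2; push_cast; ring)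
      (by convert hm using 2; push_cast; ring)]
    push_cast
    ring

lemma next_prime_eval (primes : List Int) (hne : primes.isEmpty = false)
    (x v : Int) (m : ℕ)
    (hx : PySem.List.pyGetD primes (-1) 0 + 1 = x)
    (hlt : ∀ j : ℕ, j < m → isP primes (x + (j : Int)) = false)
    (hm : isP primes (x + (m : Int)) = true)
    (hv : x + (m : Int) = v) (h) :
    next_prime primes h = v := by
  have e := nextAux_eval m primes (PySem.List.pyGetD primes (-1) 0 + 1) h
    (by rw [hx]; exact hlt) (by rw [hx]; exact hm)
  rw [next_prime, if_neg (by simp [hne]), e, hx, hv]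

-- A chooses exactly the table prime at every reachable step
lemma p_take (k : ℕ) (hk : k ≤ 9) (hp : ∀ p ∈ PRIMES.take k, 2 ≤ p) :
    pChoice (PRIMES.take k) hp = PRIMES.getD k 0 := by
  unfold pChoice
  interval_cases k
  · simp [PRIMES]
  · exact next_prime_eval _ rfl 3 3 0 (by decide) (by decide) (by decide) (by decide) _
  · exact next_prime_eval _ rfl 4 5 1 (by decide) (by decide) (by decide) (by decide) _
  · exact next_prime_eval _ rfl 6 7 1 (by decide) (by decide) (by decide) (by decide) _
  · exact next_prime_eval _ rfl 8 11 3 (by decide) (by decide) (by decide) (by decide) _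
  · exact next_prime_eval _ rfl 12 13 1 (by decide) (by decide) (by decide) (by decide) _
  · exact next_prime_eval _ rfl 14 17 3 (by decide) (by decide) (by decide) (by decide) _
  · exact next_prime_eval _ rfl 18 19 1 (by decide) (by decide) (by decide) (by decide) _
  · exact next_prime_eval _ rfl 20 23 3 (by decide) (by decide) (by decide) (by decide) _
  · exact next_prime_eval _ rfl 24 29 5 (by decide) (by decide) (by decide) (by decide) _

lemma digitsFrom_nonpos (ps : List Int) (n : Int) (hn : ¬ n > 0) : digitsFrom ps n = [] := by
  cases ps <;> simp [digitsFrom, hn]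

lemma digitsFrom_length_le (ps : List Int) : ∀ n, (digitsFrom ps n).length ≤ ps.length := by
  induction ps with
  | nil => simp [digitsFrom]
  | cons p ps ih =>
    intro n
    by_cases hn : n > 0
    · simp only [digitsFrom, if_pos hn, List.length_cons]
      exact Nat.succ_le_succ (ih _)
    · simp [digitsFrom, hn]

lemma solveLoop_step (n : Int) (primes digits : List Int) (hp) (hn : n > 0) (p : Int)
    (newps : List Int) (hpeq : pChoice primes hp = p) (hnew : primes ++ [p] = newps)
    (hq : ∀ r ∈ newps, 2 ≤ r) :
    solveLoop n primes digits hp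
      = solveLoop (PySem.Int.floordiv n p) newps (digits ++ [PySem.Int.mod n p]) hq := by
  subst hpeq hnew
  rw [solveLoop, dif_pos hn]

lemma loop_char : ∀ (f : ℕ) (n : Int) (k : ℕ) (acc : List Int) (hp),
    n.toNat ≤ f → 0 ≤ n → k ≤ 12 → n * primo k ≤ 2 ^ 31 →
    solveLoop n (PRIMES.take k) acc hp =
      (acc ++ digitsFrom (PRIMES.drop k) n,
       PRIMES.take (k + (digitsFrom (PRIMES.drop k) n).length)) := by
  intro f
  induction f with
  | zero =>
    intro n k acc hp hf h0 hk hb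
    have hn : ¬ n > 0 := by omega
    rw [solveLoop, dif_neg hn, digitsFrom_nonpos _ _ hn]
    simp
  | succ f ih =>
    intro n k acc hp hf h0 hk hb
    by_cases hn : n > 0
    · have hppos : 0 < primo k := prim_pos k hk
      have hb2 : primo k ≤ 2 ^ 31 := by nlinarith
      have hk9 : k ≤ 9 := prim_le_k9 k hk hb2
      have hklen : k < PRIMES.length := by rw [show PRIMES.length = 12 from rfl]; omega
      have hgd : PRIMES.getD k 0 = PRIMES[k] := List.getD_eq_getElem PRIMES 0 hklen
      have hp2 : 2 ≤ PRIMES[k] := primes_ge2 _ (List.getElem_mem hklen)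
      have htake : PRIMES.take k ++ [PRIMES[k]] = PRIMES.take (k + 1) := by
        rw [← List.take_concat_get hklen, List.concat_eq_append]
      have hq : ∀ r ∈ PRIMES.take (k + 1), 2 ≤ r := fun r hr => primes_ge2 r (List.mem_of_mem_take hr)
      rw [solveLoop_step n _ acc hp hn PRIMES[k] (PRIMES.take (k + 1))
        (by rw [p_take k hk9 hp, hgd]) htake hq]
      have hfd : PySem.Int.floordiv n PRIMES[k] = n / PRIMES[k] :=
        PySem.Int.floordiv_eq_ediv_of_pos (by omega)
      have hdivlt : (n / PRIMES[k]).toNat < n.toNat := by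
        have h1 : n / PRIMES[k] < n := Int.ediv_lt_of_lt_mul (by omega) (by nlinarith)
        have h2 : 0 ≤ n / PRIMES[k] := Int.ediv_nonneg (by omega) (by omega)
        omega
      have hprim1 : primo (k + 1) = primo k * PRIMES[k] := by
        rw [primo, primo, List.prod_take_succ _ _ hklen]
      have hmul : n / PRIMES[k] * PRIMES[k] ≤ n := Int.ediv_mul_le n (by omega)
      rw [hfd, ih (n / PRIMES[k]) (k + 1) (acc ++ [PySem.Int.mod n PRIMES[k]]) _
        (by omega) (Int.ediv_nonneg (by omega) (by omega)) (by omega)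
        (by rw [hprim1]; nlinarith)]
      have hdropk : PRIMES.drop k = PRIMES[k] :: PRIMES.drop (k + 1) :=
        List.drop_eq_getElem_cons hklen
      rw [hdropk]
      rw [show digitsFrom (PRIMES[k] :: PRIMES.drop (k + 1)) n
            = PySem.Int.mod n PRIMES[k] :: digitsFrom (PRIMES.drop (k + 1)) (PySem.Int.floordiv n PRIMES[k])
          from by rw [digitsFrom, if_pos hn]]
      rw [hfd, Prod.mk.injEq]
      refine ⟨by simp, ?_⟩
      congr 1
      simp
      omega
    · rw [solveLoop, dif_neg hn, digitsFrom_nonpos _ _ hn]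
      simp

lemma Str_join_singleton (sep x : String) : PySem.Str.join sep [x] = x := by
  simp [PySem.Str.join, PySem.Chars.join_singleton, String.ofList_toList]

lemma Str_join_cons (sep x : String) (rest : List String) (h : rest ≠ []) :
    PySem.Str.join sep (x :: rest) = x ++ sep ++ PySem.Str.join sep rest := by
  match rest, h with
  | q :: rs, _ =>
    simp only [PySem.Str.join, List.map_cons, PySem.Chars.join_cons_cons,
      String.ofList_append, String.ofList_toList]

lemma prefix_eq (s K : ℕ) (hs : s ≤ K) (hK : K ≤ 12) :
    (PySem.List.pyRange 0 (s : Int) 1).map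
        (fun j => PySem.Int.toStr (PySem.List.pyGetD (PRIMES.take K) j 0))
      = (PRIMES.take s).map PySem.Int.toStr := by
  have hKlen : K ≤ PRIMES.length := by rw [show PRIMES.length = 12 from rfl]; omega
  rw [PySem.List.pyRange_zero_nat s, List.map_map]
  apply List.ext_getElem
  · simp; omega
  · intro i h1 h2
    simp only [List.getElem_map, List.getElem_range, Function.comp_apply]
    have hiK : i < K := by simp at h1; omega
    have hilen : i < PRIMES.length := by omega
    have : PySem.List.pyGetD (PRIMES.take K) ((i : ℕ) : Int) 0 = PRIMES[i] := by
      rw [PySem.List.pyGetD_natCast, List.getD_eq_getElem _ 0 (by simp; omega), List.getElem_take]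
    rw [this, List.getElem_take]

lemma formatLoop_eq : ∀ (ds : List Int) (s m : ℕ) (terms : List String) (K : ℕ),
    m ≤ s → s + ds.length ≤ K → K ≤ 12 →
    formatLoop (PRIMES.take K) (PySem.List.enumerate ds (s : Int))
        ((PRIMES.take m).map PySem.Int.toStr) terms
      = terms ++ termsOf ds s := by
  intro ds
  induction ds with
  | nil => intro s m terms K _ _ _; simp [PySem.List.enumerate_nil, formatLoop, termsOf]
  | cons d ds ih =>
    intro s m terms K hms hsK hK12
    have hcast : (s : Int) + 1 = ((s + 1 : ℕ) : Int) := by push_cast; ring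
    rw [PySem.List.enumerate_cons, formatLoop, hcast]
    by_cases hd : d = 0
    · rw [if_pos (by simpa using hd)]
      rw [ih (s + 1) m terms K (by omega) (by simp at hsK ⊢; omega) hK12]
      simp [termsOf, hd]
    · rw [if_neg (by simpa using hd)]
      by_cases hs : s = 0
      · subst hs
        rw [if_pos (by simp)]
        rw [ih 1 m (terms ++ [PySem.Int.toStr d]) K (by omega) (by simp at hsK ⊢; omega) hK12]
        have : mkTerm d 0 = PySem.Int.toStr d := by
          simp [mkTerm, Str_join_singleton]
        simp [termsOf, hd, this]
      · rw [if_neg (by simpa using hs)]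
        have hm12 : m ≤ 12 ∧ s ≤ K := by
          simp only [List.length_cons] at hsK; omega
        have hlenpre : ((PRIMES.take m).map PySem.Int.toStr).length = m := by
          rw [List.length_map, List.length_take]
          rw [show PRIMES.length = 12 from rfl]
          omega
        have hsK' : s ≤ K := hm12.2
        have hpre : (if ((s : Int)) > ((((PRIMES.take m).map PySem.Int.toStr).length : ℕ) : Int) then
              (PySem.List.pyRange 0 (s : Int) 1).map
                (fun j => PySem.Int.toStr (PySem.List.pyGetD (PRIMES.take K) j 0))
            else (PRIMES.take m).map PySem.Int.toStr)
            = (PRIMES.take s).map PySem.Int.toStr := by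
          rw [hlenpre]
          by_cases hms' : m < s
          · rw [if_pos (by exact_mod_cast hms')]
            exact prefix_eq s K hsK' hK12
          · have hms2 : m = s := by omega
            rw [if_neg (by push_cast; omega), hms2]
        rw [hpre]
        rw [ih (s + 1) s (terms ++ [PySem.Int.toStr d ++ "*"
              ++ PySem.Str.join "*" ((PRIMES.take s).map PySem.Int.toStr)]) K
            (by omega) (by simp only [List.length_cons] at hsK; omega) hK12]
        have hne : (PRIMES.take s).map PySem.Int.toStr ≠ [] := by
          intro hemp
          have := congrArg List.length hemp
          rw [hlenpre] at *
          simp only [List.length_map, List.length_take, List.length_nil,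
            show PRIMES.length = 12 from rfl] at this
          omega
        have hmk : mkTerm d s = PySem.Int.toStr d ++ "*"
            ++ PySem.Str.join "*" ((PRIMES.take s).map PySem.Int.toStr) := by
          rw [mkTerm, List.map_cons, Str_join_cons _ _ _ hne]
        simp [termsOf, hd, hmk]

lemma B_terms : ∀ (j k : ℕ), k + j = 12 → ∀ (N : Int), 0 ≤ N →
    (PySem.List.enumerate (buildProds N (PRIMES.drop k) (primo k)) (k : Int)).filterMap
        (fun iq => termOf N iq.1 iq.2)
      = termsOf (digitsFrom (PRIMES.drop k) (PySem.Int.floordiv N (primo k))) k := by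
  intro j
  induction j with
  | zero =>
    intro k hkj N hN
    have hk : k = 12 := by omega
    subst hk
    rw [show PRIMES.drop 12 = [] from rfl]
    simp [buildProds, digitsFrom, termsOf, PySem.List.enumerate_nil]
  | succ j ih =>
    intro k hkj N hN
    have hk : k < 12 := by omega
    have hklen : k < PRIMES.length := by rw [show PRIMES.length = 12 from rfl]; omega
    have hppos : 0 < primo k := prim_pos k (by omega)
    have hdropk : PRIMES.drop k = PRIMES[k] :: PRIMES.drop (k + 1) :=
      List.drop_eq_getElem_cons hklen
    have hp2 : 2 ≤ PRIMES[k] := primes_ge2 _ (List.getElem_mem hklen)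
    have hfd : PySem.Int.floordiv N (primo k) = N / primo k :=
      PySem.Int.floordiv_eq_ediv_of_pos hppos
    have hprim1 : primo (k + 1) = primo k * PRIMES[k] := by
      rw [primo, primo, List.prod_take_succ _ _ hklen]
    rw [hdropk, buildProds]
    by_cases hgt : primo k > N
    · rw [if_pos hgt]
      have hz : PySem.Int.floordiv N (primo k) = 0 := by
        rw [hfd]; exact Int.ediv_eq_zero_of_lt hN hgt
      rw [hz]
      simp [PySem.List.enumerate_nil, digitsFrom, termsOf]
    · rw [if_neg hgt, PySem.List.enumerate_cons, List.filterMap_cons]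
      have hm : PySem.Int.floordiv N (primo k) > 0 := by
        rw [hfd]
        have : (1 : Int) ≤ N / primo k := by
          rw [Int.le_ediv_iff_mul_le hppos]; omega
        omega
      have hgetP : PySem.List.pyGetD PRIMES ((k : ℕ) : Int) 0 = PRIMES[k] := by
        rw [PySem.List.pyGetD_natCast, List.getD_eq_getElem _ 0 hklen]
      have hslice : PySem.List.slice PRIMES none (some ((k : ℕ) : Int)) = PRIMES.take k :=
        PySem.List.slice_to_natCast PRIMES k
      have hcomp : PySem.Int.floordiv (PySem.Int.floordiv N (primo k)) PRIMES[k]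
          = PySem.Int.floordiv N (primo (k + 1)) := by
        rw [hfd, PySem.Int.floordiv_eq_ediv_of_pos (by omega : (0:Int) < PRIMES[k]),
          PySem.Int.floordiv_eq_ediv_of_pos (by rw [hprim1]; positivity),
          Int.ediv_ediv_eq_ediv_mul (le_of_lt hppos), hprim1]
      have hdig : digitsFrom (PRIMES[k] :: PRIMES.drop (k + 1)) (PySem.Int.floordiv N (primo k))
          = PySem.Int.mod (PySem.Int.floordiv N (primo k)) PRIMES[k]
            :: digitsFrom (PRIMES.drop (k + 1)) (PySem.Int.floordiv N (primo (k + 1))) := by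
        rw [digitsFrom, if_pos hm, hcomp]
      rw [hdig, termsOf]
      have hrec := ih (k + 1) (by omega) N hN
      have hcast : (k : Int) + 1 = ((k + 1 : ℕ) : Int) := by push_cast; ring
      rw [hcast, ← hprim1, hrec]
      unfold termOf
      simp only [hgetP, hslice]
      by_cases hd : PySem.Int.mod (PySem.Int.floordiv N (primo k)) PRIMES[k] = 0
      · rw [if_neg (by simpa using hd), if_pos hd]
        simp
      · rw [if_pos (by simpa using hd), if_neg hd]
        simp [mkTerm]

lemma digitsFrom_PRIMES_ne_nil (n : Int) (hn : n > 0) : digitsFrom PRIMES n ≠ [] := by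
  simp only [PRIMES, digitsFrom, if_pos hn]
  exact List.cons_ne_nil _ _

-- ===== VERDICT (by name: the statement is the Claim_ definition above) =====
theorem solve_spec : Claim_equal_solve := by
  unfold Claim_equal_solve Spec_solve
  intro n hdom
  have hdom' : n ≤ 2147483648 := by
    unfold Dom_solve pvDomInt at hdom
    simp at hdom
    exact hdom.2
  by_cases hn : n > 0
  · -- positive input: both sides produce the canonical term list
    have hp0 : ∀ p ∈ ([] : List Int), 2 ≤ p := by simp
    have hloop := loop_char n.toNat n 0 [] hp0 (le_refl _) (by omega) (by omega)
      (by simp [primo]; omega)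
    have key : solveLoop n [] [] hp0
        = (digitsFrom PRIMES n, PRIMES.take (digitsFrom PRIMES n).length) := by
      simpa using hloop
    have hL12 : (digitsFrom PRIMES n).length ≤ 12 := by
      have := digitsFrom_length_le PRIMES n
      simpa using this
    have hfmt := formatLoop_eq (digitsFrom PRIMES n) 0 0 [] (digitsFrom PRIMES n).length
      (le_refl 0) (by omega) hL12
    simp only [Nat.cast_zero, List.take_zero, List.map_nil, List.nil_append] at hfmt
    have hB := B_terms 12 0 (by omega) n (by omega)
    have hfd1 : PySem.Int.floordiv n (primo 0) = n := by
      rw [show primo 0 = 1 from rfl, PySem.Int.floordiv_eq_ediv_of_pos one_pos, Int.ediv_one]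
    rw [hfd1] at hB
    simp only [Nat.cast_zero, List.drop_zero, show primo 0 = 1 from rfl] at hB
    unfold solve solve_alt
    rw [key]
    simp only [if_neg (by omega : ¬ n ≤ 0)]
    rw [if_neg (by simpa [List.isEmpty_iff] using digitsFrom_PRIMES_ne_nil n hn)]
    rw [hfmt, hB]
  · -- n <= 0: the loop never runs, both print '<n> = 0'
    have hz : solveLoop n [] [] nil_ge2 = ([], []) := by
      rw [solveLoop, dif_neg hn]
    unfold solve solve_alt
    rw [hz]
    simp only [if_pos (by omega : n ≤ 0), List.isEmpty_nil, if_true]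
    rw [Str_join_singleton, String.append_assoc]
    rfl
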